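-- pv_equiv track=rewrite | github.com/JGPTech/Fun | DoQrack/synergy_refraction_qrack_stable.py | _calc_balanced_ternary_integer
-- ===== SOURCE A (Python) =====
-- from typing import List, Tuple, Dict
--
-- def _calc_balanced_ternary_integer(labels_edges: List[int], aligned_target: List[int]) -> Tuple[int, str, List[int]]:
--     """
--     Build a balanced-ternary integer D from per-edge 'difference digits'.
--       e_i = labels[i] * aligned_target[i] in {-1,0,+1}
--       map to digit d_i in {-1,0,+1} as:
--         match (e_i=+1) -> 0
--         flip  (e_i=-1) -> +1
--         mute  (e_i=0)  -> -1
--       D = sum_i d_i * 3^i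
--     Also return a human-readable trit string ("-0+") with LSB at i=0 (leftmost here).
--     """
--     n = len(labels_edges)
--     di = []
--     for i in range(n):
--         e = labels_edges[i] * aligned_target[i]
--         if e == +1: di.append(0)
--         elif e == -1: di.append(+1)
--         else: di.append(-1)
--     # integer value (LSB = i=0)
--     D = 0
--     pow3 = 1
--     for d in di:
--         D += int(d) * pow3
--         pow3 *= 3
--     # pretty string with LSB first for direct index mapping
--     sym = { -1: '-', 0: '0', +1: '+' }
--     trit_str = ''.join(sym[d] for d in di)
--     return int(D), trit_str, di
-- ===== SOURCE B (Python) =====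
-- def _calc_balanced_ternary_integer(labels_edges, aligned_target):
--     # One fused pass over the edge pairs in REVERSE order: Horner accumulation
--     # (D = 3*D + d), digits and trit chars built back-to-front and reversed once.
--     # Branch-free digit mapping via bool arithmetic: e=+1 -> 0, e=-1 -> +1, else -1.
--     pairs = list(zip(labels_edges, aligned_target))
--     D = 0
--     rdi = []
--     rchars = []
--     for a, b in reversed(pairs):
--         e = a * b
--         d = 1 - 2 * (e != -1) + (e == 1)
--         D = 3 * D + d
--         rdi.append(d)
--         rchars.append("-0+"[d + 1])
--     rdi.reverse()
--     rchars.reverse()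
--     return D, ''.join(rchars), rdi
-- ===== Notes on version B (the rewrite author's own statement) =====
-- stated objective: alternative
-- what changed: B makes a single fused pass over the zipped edge pairs in reverse order, computing D by Horner's rule (D = 3*D + d) and building the digit list and trit characters back-to-front (reversed once at the end), with a branch-free bool-arithmetic digit mapping and string-index character lookup, instead of A's three staged forward loops (branching digit loop, explicit power-of-3 accumulation, dict-based string join).
import Mathlib
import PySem

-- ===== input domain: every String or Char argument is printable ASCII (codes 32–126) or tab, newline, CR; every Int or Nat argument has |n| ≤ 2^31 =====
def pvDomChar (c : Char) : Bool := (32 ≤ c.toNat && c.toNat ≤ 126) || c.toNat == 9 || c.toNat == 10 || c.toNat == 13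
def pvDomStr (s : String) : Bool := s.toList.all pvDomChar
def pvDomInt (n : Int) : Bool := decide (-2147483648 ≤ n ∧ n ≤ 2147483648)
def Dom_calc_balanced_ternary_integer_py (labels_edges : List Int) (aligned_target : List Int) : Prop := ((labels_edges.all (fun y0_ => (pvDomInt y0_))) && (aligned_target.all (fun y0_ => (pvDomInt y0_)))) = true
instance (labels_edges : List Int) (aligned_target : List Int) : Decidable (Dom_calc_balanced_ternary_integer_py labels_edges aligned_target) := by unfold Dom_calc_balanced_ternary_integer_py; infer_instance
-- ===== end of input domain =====

-- B replaces A's three staged forward loops by one fused reverse pass: Horner accumulation of D,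
-- digits and characters built back-to-front, branch-free bool-arithmetic digit map (objective: alternative).

-- ===== PORT A =====
-- literal transliteration of A: index loop over range(n), branching digit map, power-of-3 loop,
-- then the sym-dict join (the dict lookup rendered as the three-case decision it performs)
def calc_balanced_ternary_integer_py (labels_edges : List Int) (aligned_target : List Int) : Int × String × List Int :=
  let n : Int := labels_edges.length
  let di : List Int := (PySem.List.pyRange 0 n 1).foldl (fun acc i =>
      let e := (PySem.List.pyGetD labels_edges i 0) * (PySem.List.pyGetD aligned_target i 0)
      if e = 1 then acc ++ [0]
      else if e = -1 then acc ++ [1]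
      else acc ++ [-1]) []
  let Dp : Int × Int := di.foldl (fun s d => (s.1 + d * s.2, s.2 * 3)) (0, 1)
  let trit_str : String := String.ofList (di.map (fun d => if d = -1 then '-' else if d = 0 then '0' else '+'))
  (Dp.1, trit_str, di)

-- ===== PORT B =====
-- literal transliteration of B: zip, then one fold over the REVERSED pair list carrying
-- (D, rdi, rchars); finally both lists are reversed. "-0+"[d+1] is PySem.Str.pyGet?;
-- d+1 ∈ {0,1,2} is always in range, so the .getD '?' default is never used.
def calc_balanced_ternary_integer_py_alt (labels_edges : List Int) (aligned_target : List Int) : Int × String × List Int :=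
  let pairs := labels_edges.zip aligned_target
  let st : Int × List Int × List Char := pairs.reverse.foldl (fun s p =>
      let e := p.1 * p.2
      let d : Int := 1 - 2 * (if e ≠ -1 then (1 : Int) else 0) + (if e = 1 then (1 : Int) else 0)
      (3 * s.1 + d, s.2.1 ++ [d], s.2.2 ++ [(PySem.Str.pyGet? "-0+" (d + 1)).getD '?'])) (0, [], [])
  (st.1, String.ofList st.2.2.reverse, st.2.1.reverse)

-- ===== PRECONDITION & SPEC =====
-- A indexes aligned_target[i] for every i < len(labels_edges): it raises IndexError when
-- aligned_target is shorter; exactly those inputs are excluded.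
def Pre_calc_balanced_ternary_integer_py (labels_edges : List Int) (aligned_target : List Int) : Prop :=
  labels_edges.length ≤ aligned_target.length
instance (labels_edges : List Int) (aligned_target : List Int) : Decidable (Pre_calc_balanced_ternary_integer_py labels_edges aligned_target) := by unfold Pre_calc_balanced_ternary_integer_py; infer_instance
def pvWitness_calc_balanced_ternary_integer_py : List Int × List Int := ([1, -1, 0], [1, 1, 1])

def Spec_calc_balanced_ternary_integer_py (labels_edges : List Int) (aligned_target : List Int) (out : Int × String × List Int) : Prop := out = calc_balanced_ternary_integer_py_alt labels_edges aligned_target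
instance (labels_edges : List Int) (aligned_target : List Int) (out : Int × String × List Int) : Decidable (Spec_calc_balanced_ternary_integer_py labels_edges aligned_target out) := by unfold Spec_calc_balanced_ternary_integer_py; infer_instance

-- ===== CLAIM (what is proved, stated in full; the proofs are below) =====
def Claim_equal_calc_balanced_ternary_integer_py : Prop := ∀ (labels_edges : List Int) (aligned_target : List Int), Dom_calc_balanced_ternary_integer_py labels_edges aligned_target → Pre_calc_balanced_ternary_integer_py labels_edges aligned_target → Spec_calc_balanced_ternary_integer_py labels_edges aligned_target (calc_balanced_ternary_integer_py labels_edges aligned_target)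

-- ===== LEMMAS AND PROOFS =====

-- the common three-way digit map
def pvTrit (a b : Int) : Int := if a * b = 1 then 0 else if a * b = -1 then 1 else -1

-- A's trit character for a digit
def pvSym (d : Int) : Char := if d = -1 then '-' else if d = 0 then '0' else '+'

-- B's branch-free digit arithmetic equals the three-way map
theorem pvDigit_eq (a b : Int) :
    (1 - 2 * (if a * b ≠ -1 then (1 : Int) else 0) + (if a * b = 1 then (1 : Int) else 0))
    = pvTrit a b := by
  unfold pvTrit; split_ifs <;> omega

-- B's "-0+"[d+1] lookup equals A's sym map on the digits that occur
theorem pvChar_eq (a b : Int) :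
    (PySem.Str.pyGet? "-0+" (pvTrit a b + 1)).getD '?' = pvSym (pvTrit a b) := by
  unfold pvTrit
  by_cases h1 : a * b = 1
  · simp only [if_pos h1]; decide
  · by_cases h2 : a * b = -1
    · simp only [if_neg h1, if_pos h2]; decide
    · simp only [if_neg h1, if_neg h2]; decide

-- A's loop body is an append of the mapped digit
theorem pvBody_eq (acc : List Int) (a b : Int) :
    (let e := a * b;
     if e = 1 then acc ++ [0] else if e = -1 then acc ++ [1] else acc ++ [-1])
    = acc ++ [pvTrit a b] := by
  simp only [pvTrit]; split_ifs <;> rfl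

-- A's digit list is the map of pvTrit over the zipped pairs
theorem pvDiA (l1 l2 : List Int) (h : l1.length ≤ l2.length) :
    (PySem.List.pyRange 0 (l1.length : Int) 1).foldl (fun acc i =>
      let e := (PySem.List.pyGetD l1 i 0) * (PySem.List.pyGetD l2 i 0)
      if e = 1 then acc ++ [0] else if e = -1 then acc ++ [1] else acc ++ [-1]) []
    = (l1.zip l2).map (fun p => pvTrit p.1 p.2) := by
  calc (PySem.List.pyRange 0 (l1.length : Int) 1).foldl (fun acc i =>
        let e := (PySem.List.pyGetD l1 i 0) * (PySem.List.pyGetD l2 i 0)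
        if e = 1 then acc ++ [0] else if e = -1 then acc ++ [1] else acc ++ [-1]) []
      = (PySem.List.pyRange 0 (l1.length : Int) 1).foldl (fun acc i =>
          acc ++ [pvTrit (PySem.List.pyGetD l1 i 0) (PySem.List.pyGetD l2 i 0)]) [] := by
        congr 1; funext acc i; exact pvBody_eq acc _ _
    _ = (PySem.List.pyRange 0 (l1.length : Int) 1).map (fun i =>
          pvTrit (PySem.List.pyGetD l1 i 0) (PySem.List.pyGetD l2 i 0)) := by
        rw [PySem.List.foldl_append_singleton_eq_map]; rfl
    _ = (l1.zip l2).map (fun p => pvTrit p.1 p.2) := by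
        apply List.ext_getElem
        · simp [PySem.List.length_pyRange_one]
          omega
        · intro k h1 h2
          have hk1 : k < l1.length := by
            simpa [PySem.List.length_pyRange_one] using h1
          have hk2 : k < l2.length := by omega
          simp only [List.getElem_map, PySem.List.getElem_pyRange_one, List.getElem_zip,
            zero_add, PySem.List.pyGetD_natCast]
          rw [List.getD_eq_getElem l1 0 hk1, List.getD_eq_getElem l2 0 hk2]

-- A's power-accumulator fold = D0 + p * the MSB-first Horner value of the reversed digits
theorem pvHorner (l : List Int) : ∀ (D p : Int),
    (l.foldl (fun s d => (s.1 + d * s.2, s.2 * 3)) (D, p)).1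
    = D + p * (l.reverse.foldl (fun acc d => 3 * acc + d) 0) := by
  induction l with
  | nil => intro D p; simp
  | cons d t ih =>
    intro D p
    have hrev : (d :: t).reverse.foldl (fun acc d => 3 * acc + d) 0
        = 3 * (t.reverse.foldl (fun acc d => 3 * acc + d) 0) + d := by
      simp [List.foldl_append]
    simp only [List.foldl_cons, ih, hrev]
    ring

-- the port-B loop body, with lets inlined, equals the clean step function
theorem pvBodyB :
    (fun (s : Int × List Int × List Char) (p : Int × Int) =>
      (3 * s.1 + (1 - 2 * (if p.1 * p.2 ≠ -1 then (1 : Int) else 0) + (if p.1 * p.2 = 1 then (1 : Int) else 0)),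
       s.2.1 ++ [1 - 2 * (if p.1 * p.2 ≠ -1 then (1 : Int) else 0) + (if p.1 * p.2 = 1 then (1 : Int) else 0)],
       s.2.2 ++ [(PySem.Str.pyGet? "-0+" ((1 - 2 * (if p.1 * p.2 ≠ -1 then (1 : Int) else 0) + (if p.1 * p.2 = 1 then (1 : Int) else 0)) + 1)).getD '?']))
    = (fun s p => (3 * s.1 + pvTrit p.1 p.2, s.2.1 ++ [pvTrit p.1 p.2], s.2.2 ++ [pvSym (pvTrit p.1 p.2)])) := by
  funext s p
  simp only [pvDigit_eq, pvChar_eq]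

-- B's fused fold splits into a Horner fold and two mapped lists
theorem pvFoldB (l : List (Int × Int)) : ∀ (D0 : Int) (L1 : List Int) (L2 : List Char),
    l.foldl (fun s p => (3 * s.1 + pvTrit p.1 p.2, s.2.1 ++ [pvTrit p.1 p.2], s.2.2 ++ [pvSym (pvTrit p.1 p.2)])) (D0, L1, L2)
    = ((l.map (fun p => pvTrit p.1 p.2)).foldl (fun acc d => 3 * acc + d) D0,
       L1 ++ l.map (fun p => pvTrit p.1 p.2),
       L2 ++ l.map (fun p => pvSym (pvTrit p.1 p.2))) := by
  induction l with
  | nil => intro D0 L1 L2; simp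
  | cons p t ih =>
    intro D0 L1 L2
    simp [List.foldl_cons, ih]

-- ===== VERDICT (by name: the statement is the Claim_ definition above) =====
theorem calc_balanced_ternary_integer_py_spec : Claim_equal_calc_balanced_ternary_integer_py := by
  intro l1 l2 _ hpre
  show _ = _
  unfold calc_balanced_ternary_integer_py calc_balanced_ternary_integer_py_alt
  simp only [pvBodyB]
  simp only [pvFoldB]
  simp only [pvDiA l1 l2 hpre, pvHorner, List.map_reverse, List.reverse_reverse,
    List.nil_append, one_mul, zero_add, List.map_map, Function.comp_def, pvSym]
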